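-- pv_equiv track=rewrite | github.com/CureQ/CureQ | CureQ/Neural_Network/main.py | build_label_map_for_columns
-- ===== SOURCE A (Python) =====
-- from typing import Dict, List, Tuple
--
-- def build_label_map_for_columns(cols: int) -> Dict[int, str]:
--     """
--     Kolommen:
--         1–2  -> HTT-CAG54
--         3–4  -> CTRL
--         5–6  -> HTT-CAG46
--         7–8  -> CTRL
--     (0-based indices)
--     """
--     lab = {}
--     for c in range(cols):
--         if c in (0, 1):
--             lab[c] = "HTT-CAG54"
--         elif c in (2, 3):
--             lab[c] = "CTRL"
--         elif c in (4, 5):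
--             lab[c] = "HTT-CAG46"
--         elif c in (6, 7):
--             lab[c] = "CTRL"
--         else:
--             lab[c] = "UNK"
--     return lab
-- ===== SOURCE B (Python) =====
-- def build_label_map_for_columns(cols: int):
--     runs = [("HTT-CAG54", 2), ("CTRL", 2), ("HTT-CAG46", 2), ("CTRL", 2)]
--     block = [lab for lab, n in runs for _ in range(n)]
--     head = list(enumerate(block[:max(cols, 0)]))
--     tail = [(c, "UNK") for c in range(8, cols)]
--     return dict(head + tail)
-- ===== Notes on version B (the rewrite author's own statement) =====
-- stated objective: alternative
-- what changed: Instead of one pass over range(cols) with a per-column branch chain, B stages the result: it expands a run-length table into the fixed label block, truncates it to the column count and enumerates it, then concatenates a separately generated UNK block for the remaining columns - no per-column conditional at all.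
import Mathlib
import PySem

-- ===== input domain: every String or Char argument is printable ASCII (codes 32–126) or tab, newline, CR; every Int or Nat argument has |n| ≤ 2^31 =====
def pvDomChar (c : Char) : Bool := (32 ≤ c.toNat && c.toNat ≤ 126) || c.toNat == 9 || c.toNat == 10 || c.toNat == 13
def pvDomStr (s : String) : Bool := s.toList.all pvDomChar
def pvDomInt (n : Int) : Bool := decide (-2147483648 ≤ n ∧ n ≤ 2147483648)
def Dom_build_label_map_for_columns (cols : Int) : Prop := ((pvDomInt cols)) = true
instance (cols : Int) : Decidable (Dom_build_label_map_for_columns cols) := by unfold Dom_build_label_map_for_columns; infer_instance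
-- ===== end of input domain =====

-- B builds the answer in stages (run-length table expanded, truncated & enumerated head, appended UNK tail) instead of A's per-column branch chain (alternative; same cost).


-- ===== PORT A =====
def build_label_map_for_columns (cols : Int) : List (Int × String) :=
  ((PySem.List.pyRange 0 cols 1).foldl (fun lab c =>
    if c = 0 ∨ c = 1 then lab.insert c "HTT-CAG54"
    else if c = 2 ∨ c = 3 then lab.insert c "CTRL"
    else if c = 4 ∨ c = 5 then lab.insert c "HTT-CAG46"
    else if c = 6 ∨ c = 7 then lab.insert c "CTRL"
    else lab.insert c "UNK") (PySem.Dict.empty : PySem.Dict Int String)).items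

-- ===== PORT B =====
def pvRuns : List (String × Int) :=
  [("HTT-CAG54", 2), ("CTRL", 2), ("HTT-CAG46", 2), ("CTRL", 2)]

def build_label_map_for_columns_alt (cols : Int) : List (Int × String) :=
  let block := pvRuns.flatMap (fun p => List.replicate p.2.toNat p.1)
  let head := PySem.List.enumerate (block.take (max cols 0).toNat)
  let tail := (PySem.List.pyRange 8 cols 1).map (fun c => (c, "UNK"))
  head ++ tail

-- ===== PRECONDITION & SPEC =====
def Spec_build_label_map_for_columns (cols : Int) (out : List (Int × String)) : Prop := out = build_label_map_for_columns_alt cols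
instance (cols : Int) (out : List (Int × String)) : Decidable (Spec_build_label_map_for_columns cols out) := by unfold Spec_build_label_map_for_columns; infer_instance

-- ===== CLAIM (what is proved, stated in full; the proofs are below) =====
def Claim_equal_build_label_map_for_columns : Prop := ∀ (cols : Int), Dom_build_label_map_for_columns cols → Spec_build_label_map_for_columns cols (build_label_map_for_columns cols)

-- ===== LEMMAS AND PROOFS =====
def pvLabelA (c : Int) : String :=
  if c = 0 ∨ c = 1 then "HTT-CAG54"
  else if c = 2 ∨ c = 3 then "CTRL"
  else if c = 4 ∨ c = 5 then "HTT-CAG46"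
  else if c = 6 ∨ c = 7 then "CTRL"
  else "UNK"

theorem pvStep_eq (lab : PySem.Dict Int String) (c : Int) :
    (if c = 0 ∨ c = 1 then lab.insert c "HTT-CAG54"
     else if c = 2 ∨ c = 3 then lab.insert c "CTRL"
     else if c = 4 ∨ c = 5 then lab.insert c "HTT-CAG46"
     else if c = 6 ∨ c = 7 then lab.insert c "CTRL"
     else lab.insert c "UNK") = lab.insert c (pvLabelA c) := by
  unfold pvLabelA; split_ifs <;> rfl

-- fold over fresh, distinct keys appends one item per key
theorem pvFold_items (l : List Int) (d : PySem.Dict Int String)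
    (hfresh : ∀ c ∈ l, d.contains c = false) (hnd : l.Nodup) :
    (l.foldl (fun lab c => lab.insert c (pvLabelA c)) d).items
      = d.items ++ l.map (fun c => (c, pvLabelA c)) := by
  induction l generalizing d with
  | nil => simp
  | cons a t ih =>
    simp only [List.foldl_cons, List.map_cons]
    rw [ih (d.insert a (pvLabelA a))
        (by
          intro c hc
          rw [PySem.Dict.contains_insert]
          have hne : c ≠ a := by
            rintro rfl; exact (List.nodup_cons.mp hnd).1 hc
          simp [hne, hfresh c (List.mem_cons_of_mem a hc)])
        (List.nodup_cons.mp hnd).2]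
    have hfa : d.contains a = false := hfresh a (by simp)
    rw [PySem.Dict.items_insert, hfa]
    simp

-- A's result as a plain map over the range
theorem pvA_map (cols : Int) :
    build_label_map_for_columns cols
      = (PySem.List.pyRange 0 cols 1).map (fun c => (c, pvLabelA c)) := by
  unfold build_label_map_for_columns
  have hstep : (fun (lab : PySem.Dict Int String) (c : Int) =>
      if c = 0 ∨ c = 1 then lab.insert c "HTT-CAG54"
      else if c = 2 ∨ c = 3 then lab.insert c "CTRL"
      else if c = 4 ∨ c = 5 then lab.insert c "HTT-CAG46"
      else if c = 6 ∨ c = 7 then lab.insert c "CTRL"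
      else lab.insert c "UNK")
      = fun lab c => lab.insert c (pvLabelA c) := by
    funext lab c; exact pvStep_eq lab c
  rw [hstep, pvFold_items _ _ (fun c _ => PySem.Dict.contains_empty c)
      (PySem.List.nodup_pyRange_one 0 cols)]
  rfl

-- ===== VERDICT (by name: the statement is the Claim_ definition above) =====
theorem build_label_map_for_columns_spec : Claim_equal_build_label_map_for_columns := by
  intro cols _
  unfold Spec_build_label_map_for_columns
  rw [pvA_map]
  unfold build_label_map_for_columns_alt
  by_cases h8 : cols ≤ 8
  · -- the whole range lies in the first 8 columns; tail is empty
    have htail : PySem.List.pyRange 8 cols 1 = [] := by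
      simp [PySem.List.pyRange]; omega
    rw [htail]
    by_cases h0 : cols ≤ 0
    · have : PySem.List.pyRange 0 cols 1 = [] := by
        simp [PySem.List.pyRange]; omega
      have hm : max cols 0 = 0 := by omega
      simp [this, hm]
    · have h1 : 1 ≤ cols := by omega
      interval_cases cols <;> decide
  · -- cols > 8 : split the range at 8
    rw [PySem.List.pyRange_one_append 0 8 cols (by norm_num) (by omega)]
    rw [List.map_append]
    congr 1
    · -- head: take swallows the whole block since max cols 0 ≥ 8
      have hm : (max cols 0).toNat ≥ 8 := by omega
      have hblock : (pvRuns.flatMap (fun p => List.replicate p.2.toNat p.1)).take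
          (max cols 0).toNat = pvRuns.flatMap (fun p => List.replicate p.2.toNat p.1) := by
        apply List.take_of_length_le
        simpa [pvRuns] using hm
      rw [hblock]
      decide
    · exact List.map_congr_left (fun c hc => by
        have h := (PySem.List.mem_pyRange_one.mp hc).1
        unfold pvLabelA
        split_ifs <;> first | rfl | omega)
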